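-- pv_equiv track=rewrite | github.com/gridvisi/Python_workspace | 3 codewars/6 kyu/6kyu Shortest steps to a number.py | shortest_steps_to_num
-- ===== SOURCE A (Python) =====
-- def shortest_steps_to_num(num,ct=0):
--     if num == 1:
--         return ct
--     elif num%2 == 1:
--         #re = num//2
--         ct += 2
--         return shortest_steps_to_num(num//2,ct)
--     elif num%2 == 0:
--         ct += 1
--         return shortest_steps_to_num(num // 2,ct)
-- ===== SOURCE B (Python) =====
-- def shortest_steps_to_num(num, ct=0):
--     # closed form: steps = bit_length + popcount - 2 for num >= 1
--     return ct + num.bit_length() + bin(num).count("1") - 2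
-- ===== Notes on version B (the rewrite author's own statement) =====
-- stated objective: faster
-- what changed: Replaced the per-bit tail recursion by the closed form ct + num.bit_length() + bin(num).count('1') - 2, which computes the same step count without any loop or recursion.
import Mathlib
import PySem

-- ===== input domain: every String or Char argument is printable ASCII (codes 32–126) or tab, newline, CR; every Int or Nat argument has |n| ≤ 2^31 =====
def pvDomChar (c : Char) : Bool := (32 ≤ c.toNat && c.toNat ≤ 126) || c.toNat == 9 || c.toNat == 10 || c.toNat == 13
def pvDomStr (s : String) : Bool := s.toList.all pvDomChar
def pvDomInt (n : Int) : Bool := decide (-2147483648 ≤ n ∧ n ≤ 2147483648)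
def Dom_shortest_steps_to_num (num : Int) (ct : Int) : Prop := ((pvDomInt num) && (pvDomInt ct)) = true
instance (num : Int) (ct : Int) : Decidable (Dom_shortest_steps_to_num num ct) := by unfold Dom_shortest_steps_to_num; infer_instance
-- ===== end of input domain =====

-- B replaces A's tail recursion by the closed form ct + bit_length(num) + popcount(num) - 2 (constant number of Python-level ops).


-- ===== PORT A =====
-- Literal port of A's recursion.  For num ≤ 0 the Python recurses forever
-- (RecursionError); the dite guard only makes the Lean function total there
-- (those inputs are outside Pre_).  The final Python branch 'elif num%2 == 0'
-- always holds when num%2 ≠ 1, so it is the else branch here.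
def shortest_steps_to_num (num : Int) (ct : Int) : Int :=
  if num = 1 then ct
  else if _h : num ≤ 1 then ct  -- totality guard: Python diverges here (outside Pre_)
  else if PySem.Int.mod num 2 = 1 then
    shortest_steps_to_num (PySem.Int.floordiv num 2) (ct + 2)
  else
    shortest_steps_to_num (PySem.Int.floordiv num 2) (ct + 1)
termination_by num.toNat
decreasing_by
  all_goals
    rw [PySem.Int.floordiv_eq_ediv_of_pos (by omega : (0:Int) < 2)]
    omega

-- ===== PORT B =====
-- num.bit_length() → PySem.Int.bitLength, bin(num).count("1") → PySem.Int.bitCount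
-- (equal to the '1'-count of bin(num) for num ≥ 1, i.e. on all of Pre_).
def shortest_steps_to_num_alt (num : Int) (ct : Int) : Int :=
  ct + (PySem.Int.bitLength num : Int) + (PySem.Int.bitCount num : Int) - 2

-- ===== PRECONDITION & SPEC =====
-- Pre_ excludes num ≤ 0, where A recurses forever and dies with RecursionError.
def Pre_shortest_steps_to_num (num : Int) (ct : Int) : Prop := 1 ≤ num
instance (num : Int) (ct : Int) : Decidable (Pre_shortest_steps_to_num num ct) := by
  unfold Pre_shortest_steps_to_num; infer_instance
def pvWitness_shortest_steps_to_num : Int × Int := (6, 0)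

def Spec_shortest_steps_to_num (num : Int) (ct : Int) (out : Int) : Prop := out = shortest_steps_to_num_alt num ct
instance (num : Int) (ct : Int) (out : Int) : Decidable (Spec_shortest_steps_to_num num ct out) := by unfold Spec_shortest_steps_to_num; infer_instance

-- ===== CLAIM (what is proved, stated in full; the proofs are below) =====
def Claim_equal_shortest_steps_to_num : Prop := ∀ (num : Int) (ct : Int), Dom_shortest_steps_to_num num ct → Pre_shortest_steps_to_num num ct → Spec_shortest_steps_to_num num ct (shortest_steps_to_num num ct)

-- ===== LEMMAS AND PROOFS =====

-- Main invariant, by strong induction on num.toNat.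
theorem shortest_steps_closed_form :
    ∀ (n : Nat) (num ct : Int), num.toNat = n → 1 ≤ num →
      shortest_steps_to_num num ct
        = ct + (PySem.Int.bitLength num : Int) + (PySem.Int.bitCount num : Int) - 2 := by
  intro n
  induction n using Nat.strong_induction_on with
  | _ n ih =>
    intro num ct hn hpos
    rw [shortest_steps_to_num]
    by_cases h1 : num = 1
    · subst h1
      have : PySem.Int.bitLength 1 = 1 := by decide
      have h2 : PySem.Int.bitCount 1 = 1 := by decide
      simp [this, h2]; ring
    · have h2 : (2:Int) ≤ num := by omega
      have hfd : PySem.Int.floordiv num 2 = num / 2 :=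
        PySem.Int.floordiv_eq_ediv_of_pos (by omega)
      have hfpos : 1 ≤ PySem.Int.floordiv num 2 := by rw [hfd]; omega
      have hlt : (PySem.Int.floordiv num 2).toNat < n := by rw [hfd]; omega
      have hBL := PySem.Int.bitLength_of_pos (n := num) (by omega)
      have hBC := PySem.Int.bitCount_of_pos (n := num) (by omega)
      have hmd : PySem.Int.mod num 2 = num % 2 :=
        PySem.Int.mod_eq_emod_of_pos (by omega)
      simp only [if_neg h1, dif_neg (by omega : ¬ num ≤ 1)]
      by_cases hodd : PySem.Int.mod num 2 = 1
      · rw [if_pos hodd,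
          ih _ hlt (PySem.Int.floordiv num 2) (ct + 2) rfl hfpos, hBL, hBC, hodd]
        push_cast; ring
      · have hmod0 : PySem.Int.mod num 2 = 0 := by rw [hmd]; rw [hmd] at hodd; omega
        rw [if_neg hodd,
          ih _ hlt (PySem.Int.floordiv num 2) (ct + 1) rfl hfpos, hBL, hBC, hmod0]
        push_cast; ring

-- ===== VERDICT (by name: the statement is the Claim_ definition above) =====
theorem shortest_steps_to_num_spec : Claim_equal_shortest_steps_to_num := by
  intro num ct _ hpre
  unfold Spec_shortest_steps_to_num shortest_steps_to_num_alt
  exact shortest_steps_closed_form num.toNat num ct rfl hpre
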